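-- pv_equiv track=rewrite | github.com/roses16-dev/check_my_algorithm | programmers/15008.py | solution
-- ===== SOURCE A (Python) =====
-- def solution(input_string):
--     chars = 'abcdefghijklmnopqrstuvwxyz'
--     answer = ''
--
--     for c in chars:
--         if not c in input_string:
--             continue
--
--         start = input_string.find(c)
--         end = input_string.rfind(c)
--
--         if input_string[start:end] != c * (end-start):
--             answer += c
--
--     return answer if len(answer) else "N"
-- ===== SOURCE B (Python) =====
-- def solution(input_string):
--     info = {}
--     for i, ch in enumerate(input_string):
--         if ch in info:
--             cnt, first, _ = info[ch]
--             info[ch] = (cnt + 1, first, i)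
--         else:
--             info[ch] = (1, i, i)
--     answer = ''
--     for c in 'abcdefghijklmnopqrstuvwxyz':
--         if c in info:
--             cnt, first, last = info[c]
--             if last - first + 1 != cnt:
--                 answer += c
--     return answer if answer else 'N'
-- ===== Notes on version B (the rewrite author's own statement) =====
-- stated objective: alternative
-- what changed: A scans the string once per alphabet letter with find/rfind plus a slice-vs-repetition comparison; B makes a single pass building a per-letter (count, first index, last index) table and flags a letter iff last - first + 1 != count.
import Mathlib
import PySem

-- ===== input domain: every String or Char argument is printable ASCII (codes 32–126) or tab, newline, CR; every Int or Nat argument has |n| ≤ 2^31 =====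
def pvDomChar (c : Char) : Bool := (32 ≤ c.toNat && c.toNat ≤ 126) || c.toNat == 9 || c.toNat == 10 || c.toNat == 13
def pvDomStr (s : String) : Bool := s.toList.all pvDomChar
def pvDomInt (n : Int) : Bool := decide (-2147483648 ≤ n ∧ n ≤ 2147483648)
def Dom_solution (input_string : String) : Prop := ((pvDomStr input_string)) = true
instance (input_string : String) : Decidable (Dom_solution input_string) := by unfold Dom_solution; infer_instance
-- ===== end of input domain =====

-- B replaces A's per-letter find/rfind/slice scans of the string by ONE pass building a
-- per-letter (count, first index, last index) table, then checks last-first+1 != count per letter.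

-- ===== PORT A =====
def pvAlphabet : List Char := "abcdefghijklmnopqrstuvwxyz".toList

def solution (input_string : String) : String :=
  let s := input_string.toList
  let answer := pvAlphabet.foldl (fun answer c =>
    if PySem.Chars.isIn [c] s = false then answer
    else
      let start := PySem.Chars.find s [c]
      let stop := PySem.Chars.rfind s [c]
      if PySem.List.slice s (some start) (some stop) ≠ PySem.List.pyRepeat [c] (stop - start) then
        answer ++ [c]
      else answer) []
  if answer.length ≠ 0 then String.ofList answer else "N"

-- ===== PORT B =====
def pvIndexStep (d : PySem.Dict Char (Int × Int × Int)) (p : Int × Char) :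
    PySem.Dict Char (Int × Int × Int) :=
  match d.get? p.2 with
  | some (cnt, first, _) => d.insert p.2 (cnt + 1, first, p.1)
  | none => d.insert p.2 (1, p.1, p.1)

def solution_alt (input_string : String) : String :=
  let s := input_string.toList
  let info := (PySem.List.enumerate s 0).foldl pvIndexStep PySem.Dict.empty
  let answer := pvAlphabet.foldl (fun answer c =>
    match info.get? c with
    | some (cnt, first, last) => if last - first + 1 ≠ cnt then answer ++ [c] else answer
    | none => answer) []
  if answer = [] then "N" else String.ofList answer

-- ===== PRECONDITION & SPEC =====
def Spec_solution (input_string : String) (out : String) : Prop := out = solution_alt input_string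
instance (input_string : String) (out : String) : Decidable (Spec_solution input_string out) := by unfold Spec_solution; infer_instance

-- ===== CLAIM (what is proved, stated in full; the proofs are below) =====
def Claim_equal_solution : Prop := ∀ (input_string : String), Dom_solution input_string → Spec_solution input_string (solution input_string)

-- ===== LEMMAS AND PROOFS =====

-- index of the LAST occurrence of c in l (meaningful only when c ∈ l)
def pvLastIdx (l : List Char) (c : Char) : Nat :=
  Nat.findGreatest (fun i => l[i]? = some c) l.length

-- A's string primitives on a single-character needle
theorem pvFindGo (c : Char) (l : List Char) (k : Nat) :
    PySem.Chars.find.go [c] l k = if c ∈ l then ((k : Int) + (l.idxOf c : Int)) else -1 := by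
  induction l generalizing k with
  | nil => simp [PySem.Chars.find.go]
  | cons h t ih =>
    rw [PySem.Chars.find.go]
    by_cases hc : c = h
    · subst hc
      simp [List.isPrefixOf, List.idxOf_cons_self]
    · have hpre : List.isPrefixOf [c] (h :: t) = false := by
        simp [List.isPrefixOf]; exact fun e => hc e
      rw [hpre]
      simp only [Bool.false_eq_true, if_false, ih]
      have hne : (h == c) = false := by simp; exact fun e => hc e.symm
      by_cases hm : c ∈ t
      · simp [hm, hc, List.idxOf_cons, hne]; omega
      · simp [hm, hc]

theorem pvFind_singleton (l : List Char) (c : Char) :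
    PySem.Chars.find l [c] = if c ∈ l then (l.idxOf c : Int) else -1 := by
  rw [PySem.Chars.find, pvFindGo]; simp

theorem pvIsIn_singleton (l : List Char) (c : Char) :
    PySem.Chars.isIn [c] l = true ↔ c ∈ l := by
  rw [PySem.Chars.isIn, bne_iff_ne, ne_eq, pvFind_singleton]
  by_cases h : c ∈ l <;> simp [h]

theorem pvPrefix_singleton (c : Char) (l : List Char) :
    List.isPrefixOf [c] l = (l.head? == some c) := by
  cases l <;> simp [List.isPrefixOf, eq_comm]

theorem pvRfindGo (c : Char) (l : List Char) (j : Nat) :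
    PySem.Chars.rfind.go l [c] j =
      if ∃ i ≤ j, l[i]? = some c then ((Nat.findGreatest (fun i => l[i]? = some c) j : Nat) : Int)
      else -1 := by
  induction j with
  | zero =>
    rw [PySem.Chars.rfind.go]
    by_cases h : l[0]? = some c <;>
      simp [pvPrefix_singleton, List.head?_eq_getElem?, h, Nat.findGreatest]
  | succ j ih =>
    rw [PySem.Chars.rfind.go]
    by_cases h : l[j+1]? = some c
    · have hpre : List.isPrefixOf [c] (List.drop (j+1) l) = true := by
        simp [pvPrefix_singleton, List.head?_drop, h]
      rw [hpre]
      have hex : ∃ i ≤ j + 1, l[i]? = some c := ⟨j+1, le_refl _, h⟩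
      rw [if_pos hex, Nat.findGreatest_succ, if_pos h]
      simp
    · have hpre : List.isPrefixOf [c] (List.drop (j+1) l) = false := by
        simp [pvPrefix_singleton, List.head?_drop, h]
      rw [hpre]
      simp only [Bool.false_eq_true, if_false, ih, Nat.findGreatest_succ, if_neg h]
      congr 1
      · simp only [eq_iff_iff]
        constructor
        · rintro ⟨i, hi, hp⟩
          exact ⟨i, Nat.le_succ_of_le hi, hp⟩
        · rintro ⟨i, hi, hp⟩
          have hne : i ≠ j + 1 := fun e => h (e ▸ hp)
          exact ⟨i, by omega, hp⟩

theorem pvRfind_singleton (l : List Char) (c : Char) :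
    PySem.Chars.rfind l [c] = if c ∈ l then (pvLastIdx l c : Int) else -1 := by
  rw [PySem.Chars.rfind, pvRfindGo, pvLastIdx]
  congr 1
  simp only [eq_iff_iff]
  constructor
  · rintro ⟨i, _, hp⟩
    exact List.mem_of_getElem? hp
  · intro hm
    obtain ⟨i, hi, he⟩ := List.getElem_of_mem hm
    refine ⟨i, le_of_lt hi, ?_⟩
    simp [List.getElem?_eq_getElem hi, he]

theorem pvLastIdx_spec (l : List Char) (c : Char) (h : c ∈ l) :
    l[pvLastIdx l c]? = some c ∧ ∀ k, pvLastIdx l c < k → l[k]? ≠ some c := by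
  obtain ⟨i, hi, he⟩ := List.getElem_of_mem h
  have hp : l[i]? = some c := by simp [List.getElem?_eq_getElem hi, he]
  unfold pvLastIdx
  constructor
  · exact Nat.findGreatest_spec (P := fun i => l[i]? = some c) (Nat.le_of_lt hi) hp
  · intro k hk hc
    rcases Nat.lt_or_ge k l.length with h' | h'
    · exact Nat.findGreatest_is_greatest (P := fun i => l[i]? = some c) hk (Nat.le_of_lt h') hc
    · rw [List.getElem?_eq_none h'] at hc; simp at hc

-- how the last-occurrence index evolves when a character is appended
theorem pvLastIdx_append_self (t : List Char) (x : Char) :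
    pvLastIdx (t ++ [x]) x = t.length := by
  unfold pvLastIdx
  simp only [List.length_append, List.length_cons, List.length_nil, Nat.zero_add]
  have hP : (t ++ [x])[t.length]? = some x := by
    rw [List.getElem?_append_right (le_refl _)]; simp
  have hle : t.length ≤ Nat.findGreatest (fun i => (t ++ [x])[i]? = some x) (t.length + 1) :=
    Nat.le_findGreatest (Nat.le_succ _) hP
  have hub := Nat.findGreatest_le (P := fun i => (t ++ [x])[i]? = some x) (t.length + 1)
  have hspec : (t ++ [x])[Nat.findGreatest (fun i => (t ++ [x])[i]? = some x) (t.length + 1)]? = some x :=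
    Nat.findGreatest_spec (P := fun i => (t ++ [x])[i]? = some x) (m := t.length) (Nat.le_succ _) hP
  by_contra hne
  have heq : Nat.findGreatest (fun i => (t ++ [x])[i]? = some x) (t.length + 1) = t.length + 1 := by
    omega
  rw [heq, List.getElem?_eq_none (by simp)] at hspec
  simp at hspec

theorem pvLastIdx_append_ne (t : List Char) (x c : Char) (hne : c ≠ x) (hm : c ∈ t) :
    pvLastIdx (t ++ [x]) c = pvLastIdx t c := by
  unfold pvLastIdx
  simp only [List.length_append, List.length_cons, List.length_nil, Nat.zero_add]
  obtain ⟨i, hi, he⟩ := List.getElem_of_mem hm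
  have hp : t[i]? = some c := by simp [List.getElem?_eq_getElem hi, he]
  set m := Nat.findGreatest (fun i => t[i]? = some c) t.length with hm_def
  have hmspec : t[m]? = some c :=
    Nat.findGreatest_spec (P := fun i => t[i]? = some c) (Nat.le_of_lt hi) hp
  have hmlt : m < t.length := (List.getElem?_eq_some_iff.mp hmspec).1
  have hp' : (t ++ [x])[m]? = some c := by rw [List.getElem?_append_left hmlt]; exact hmspec
  set M := Nat.findGreatest (fun i => (t ++ [x])[i]? = some c) (t.length + 1) with hM_def
  have hle : m ≤ M := Nat.le_findGreatest (by omega) hp'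
  have hMspec : (t ++ [x])[M]? = some c :=
    Nat.findGreatest_spec (P := fun i => (t ++ [x])[i]? = some c) (m := m) (by omega) hp'
  have hub : M ≤ m := by
    by_contra hgt
    rcases Nat.lt_or_ge M t.length with hM | hM
    · rw [List.getElem?_append_left hM] at hMspec
      exact absurd hMspec
        (Nat.findGreatest_is_greatest (P := fun i => t[i]? = some c) (by omega) (Nat.le_of_lt hM))
    · have hMlt : M < t.length + 1 := by
        have := (List.getElem?_eq_some_iff.mp hMspec).1; simp at this; omega
      have hMeq : M = t.length := by omega
      rw [hMeq, List.getElem?_append_right (le_refl _)] at hMspec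
      simp at hMspec
      exact hne hMspec.symm
  omega

-- what B's single pass computes, per character
theorem pvDict_inv (l : List Char) (c : Char) :
    ((PySem.List.enumerate l 0).foldl pvIndexStep PySem.Dict.empty).get? c =
      if c ∈ l then some (((l.count c : Int)), ((l.idxOf c : Int)), ((pvLastIdx l c : Int)))
      else none := by
  induction l using List.reverseRecOn with
  | nil => simp [PySem.List.enumerate_nil, PySem.Dict.get?_empty]
  | append_singleton t x ih =>
    rw [PySem.List.enumerate_append, List.foldl_append]
    simp only [PySem.List.enumerate_cons, PySem.List.enumerate_nil, List.foldl_cons, List.foldl_nil]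
    rw [pvIndexStep]
    simp only
    by_cases hcx : c = x
    · subst hcx
      rw [ih]
      by_cases hm : c ∈ t
      · rw [if_pos hm]
        simp only
        rw [PySem.Dict.get?_insert_self, if_pos (by simp)]
        rw [List.count_append, List.idxOf_append_of_mem hm, pvLastIdx_append_self]
        simp
      · rw [if_neg hm]
        simp only
        rw [PySem.Dict.get?_insert_self, if_pos (by simp)]
        rw [List.count_append, List.idxOf_append_of_notMem hm, pvLastIdx_append_self]
        simp [List.count_eq_zero.mpr hm]
    · have hg : ∀ dd : PySem.Dict Char (Int × Int × Int),
          ((match dd.get? x with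
            | some (cnt, first, _) => dd.insert x (cnt + 1, first, 0 + (t.length : Int))
            | none => dd.insert x (1, 0 + (t.length : Int), 0 + (t.length : Int))).get? c)
            = dd.get? c := by
        intro dd
        cases hx : dd.get? x with
        | none => exact PySem.Dict.get?_insert_of_ne _ _ hcx
        | some v =>
          obtain ⟨cnt, first, last⟩ := v
          exact PySem.Dict.get?_insert_of_ne _ _ hcx
      rw [hg, ih]
      by_cases hm : c ∈ t
      · rw [if_pos hm, if_pos (by simp [hm]), List.count_append, List.idxOf_append_of_mem hm,
          pvLastIdx_append_ne t x c hcx hm]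
        simp [List.count_eq_zero.mpr (by simp [hcx] : c ∉ [x])]
      · rw [if_neg hm, if_neg (by simp [hm, hcx])]

-- A's per-letter gap test agrees with B's span-vs-count test
theorem pvCond_iff (l : List Char) (c : Char) (h : c ∈ l) :
    (PySem.List.slice l (some ((l.idxOf c : Int))) (some ((pvLastIdx l c : Int))) ≠
        PySem.List.pyRepeat [c] ((pvLastIdx l c : Int) - (l.idxOf c : Int))) ↔
      ((pvLastIdx l c : Int) - (l.idxOf c : Int) + 1 ≠ (l.count c : Int)) := by
  obtain ⟨hjget, hjmax⟩ := pvLastIdx_spec l c h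
  set i := l.idxOf c with hi_def
  set j := pvLastIdx l c with hj_def
  have hij : i ≤ j := by
    by_contra hgt
    exact hjmax i (by omega) (List.getElem?_idxOf h)
  have hjlt : j < l.length := (List.getElem?_eq_some_iff.mp hjget).1
  have hjval : l[j]'hjlt = c := by
    have := (List.getElem?_eq_some_iff.mp hjget).2; simpa using this
  rw [PySem.List.slice_natCast, show ((j : Int) - (i : Int)) = ((j - i : Nat) : Int) by omega,
    PySem.List.pyRepeat_singleton]
  rw [show (((j - i : Nat) : Int)).toNat = j - i by omega]
  have hdecomp : l = l.take i ++ ((l.drop i).take (j - i) ++ l.drop j) := by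
    rw [show (l.drop i).take (j-i) ++ l.drop j = l.drop i by
      nth_rewrite 2 [← List.take_append_drop (j - i) (l.drop i)]
      rw [List.drop_drop, show i + (j - i) = j by omega]]
    rw [List.take_append_drop]
  have hcount_take : List.count c (l.take i) = 0 := by
    rw [List.count_eq_zero]
    intro hmem
    rw [List.mem_take_iff_idxOf_lt h] at hmem
    omega
  have hcount_dropj : List.count c (l.drop j) = 1 := by
    rw [List.drop_eq_getElem_cons hjlt, hjval]
    simp only [List.count_cons_self]
    have hz : List.count c (l.drop (j+1)) = 0 := by
      rw [List.count_eq_zero]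
      intro hmem
      obtain ⟨k, hk, he⟩ := List.getElem_of_mem hmem
      refine hjmax (j + 1 + k) (by omega) ?_
      rw [← List.getElem?_drop, List.getElem?_eq_getElem hk, he]
    omega
  have hcount : (l.count c) = List.count c ((l.drop i).take (j - i)) + 1 := by
    conv_lhs => rw [hdecomp]
    rw [List.count_append, List.count_append, hcount_take, hcount_dropj]
    omega
  have hseglen : ((l.drop i).take (j - i)).length = j - i := by
    simp [List.length_take, List.length_drop]
    omega
  have hmain : ((l.drop i).take (j - i) = List.replicate (j - i) c) ↔
      List.count c ((l.drop i).take (j - i)) = j - i := by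
    constructor
    · intro he; rw [he]; simp
    · intro hc
      rw [List.eq_replicate_iff]
      refine ⟨hseglen, ?_⟩
      intro b hb
      have := List.count_eq_length.mp (by rw [hc, hseglen])
      exact (this b hb).symm
  constructor
  · intro hne hne2
    exact hne (hmain.mpr (by omega))
  · intro hne2 hne
    exact hne2 (by have := hmain.mp hne; omega)

theorem pvTail (L : List Char) :
    (if L.length ≠ 0 then String.ofList L else "N") = (if L = [] then "N" else String.ofList L) := by
  cases L <;> simp

-- ===== VERDICT (by name: the statement is the Claim_ definition above) =====
theorem solution_spec : Claim_equal_solution := by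
  intro input_string _
  unfold Spec_solution solution solution_alt
  have hfun : (fun (answer : List Char) (c : Char) =>
      if PySem.Chars.isIn [c] input_string.toList = false then answer
      else
        let start := PySem.Chars.find input_string.toList [c]
        let stop := PySem.Chars.rfind input_string.toList [c]
        if PySem.List.slice input_string.toList (some start) (some stop) ≠
            PySem.List.pyRepeat [c] (stop - start) then
          answer ++ [c]
        else answer) =
      (fun (answer : List Char) (c : Char) =>
        match ((PySem.List.enumerate input_string.toList 0).foldl pvIndexStep
            PySem.Dict.empty).get? c with
        | some (cnt, first, last) => if last - first + 1 ≠ cnt then answer ++ [c] else answer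
        | none => answer) := by
    funext acc c
    rw [pvDict_inv]
    by_cases hm : c ∈ input_string.toList
    · rw [(pvIsIn_singleton _ _).mpr hm, if_pos hm]
      simp only [Bool.true_eq_false, if_false]
      rw [pvFind_singleton, pvRfind_singleton, if_pos hm, if_pos hm]
      exact if_congr (pvCond_iff input_string.toList c hm) rfl rfl
    · rw [if_neg hm]
      have hin : PySem.Chars.isIn [c] input_string.toList = false := by
        rcases Bool.eq_false_or_eq_true (PySem.Chars.isIn [c] input_string.toList) with h | h
        · exact absurd ((pvIsIn_singleton _ _).mp h) hm
        · exact h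
      rw [hin]
      simp
  show (if (pvAlphabet.foldl _ ([] : List Char)).length ≠ 0 then _ else _) = _
  rw [hfun]
  exact pvTail _
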